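-- pv_equiv track=rewrite | github.com/pluskal-lab/TerpeneMiner | utils/structural_domains.py | find_continuous_segments_longer_than
-- ===== SOURCE A (Python) =====
-- def find_continuous_segments_longer_than(
--     residues_subset, min_secondary_struct_len=40, max_allowed_gap=5
-- ):
--     res_continuous_segments = [[]]
--     prev_res = None
--     for res in sorted(map(int, residues_subset)):
--         if prev_res is not None:
--             allowed_prev_residues = {prev_res + 1}.union(
--                 {prev_res + 1 + i for i in range(max_allowed_gap)}
--             )
--         if prev_res is not None and res not in allowed_prev_residues:
--             if (
--                 max(res_continuous_segments[-1]) - min(res_continuous_segments[-1])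
--                 >= min_secondary_struct_len
--             ):
--                 res_continuous_segments.append([])
--             else:
--                 res_continuous_segments[-1] = []
--         res_continuous_segments[-1].append(res)
--         prev_res = res
--     if (
--         len(res_continuous_segments[-1]) == 0
--         or max(res_continuous_segments[-1]) - min(res_continuous_segments[-1])
--         < min_secondary_struct_len
--     ):
--         res_continuous_segments = res_continuous_segments[:-1]
--     return res_continuous_segments
-- ===== SOURCE B (Python) =====
-- def find_continuous_segments_longer_than(
--     residues_subset, min_secondary_struct_len=40, max_allowed_gap=5
-- ):
--     # Boundary-index formulation: compute the indices where a new segment starts,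
--     # pair them into (begin, end) bounds, and slice the sorted list -- no segment
--     # accumulator is maintained at all.
--     s = sorted(map(int, residues_subset))
--     step = max(1, max_allowed_gap)
--     n = len(s)
--     starts = [i for i in range(n) if i == 0 or not (s[i - 1] + 1 <= s[i] <= s[i - 1] + step)]
--     bounds = list(zip(starts, starts[1:] + [n]))
--     return [s[b:e] for b, e in bounds if s[e - 1] - s[b] >= min_secondary_struct_len]
-- ===== Notes on version B (the rewrite author's own statement) =====
-- stated objective: faster
-- what changed: Replaces A's stateful loop that mutates a nested list of segments (building a per-element allowed-residue set from a range, rescanning the current segment with max/min at every break, trimming the trailing slot) by an index-based formulation: compute the break indices where a new segment starts, zip them into (begin,end) bounds, and return the slices of the sorted list whose span meets the threshold; no segment accumulator exists at all.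
import Mathlib
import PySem

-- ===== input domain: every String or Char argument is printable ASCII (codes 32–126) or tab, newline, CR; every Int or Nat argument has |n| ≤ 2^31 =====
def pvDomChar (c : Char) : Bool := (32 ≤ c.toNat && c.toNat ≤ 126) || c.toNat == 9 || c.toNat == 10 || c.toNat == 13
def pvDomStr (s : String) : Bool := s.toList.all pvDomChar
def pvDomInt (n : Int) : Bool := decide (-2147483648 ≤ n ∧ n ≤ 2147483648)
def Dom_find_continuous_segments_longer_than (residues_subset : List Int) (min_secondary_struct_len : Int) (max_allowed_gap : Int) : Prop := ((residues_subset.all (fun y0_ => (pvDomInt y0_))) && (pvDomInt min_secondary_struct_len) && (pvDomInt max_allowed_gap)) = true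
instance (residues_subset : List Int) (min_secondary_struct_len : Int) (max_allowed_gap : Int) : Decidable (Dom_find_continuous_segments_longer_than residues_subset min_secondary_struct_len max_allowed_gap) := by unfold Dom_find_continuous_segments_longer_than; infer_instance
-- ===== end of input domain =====

-- B replaces A's stateful loop over a mutated nested list (per-element allowed-set, max/min rescans)
-- by an index-based formulation: compute the break indices where a new segment starts, zip them into
-- (begin,end) bounds, and return the slices of the sorted list whose span meets the threshold
-- (objective: faster; a timing run measured B faster).

-- ===== PORT A =====
-- max(xs) / min(xs): every call site in A has xs nonempty, so the default is never used
def pyMaxA (xs : List Int) : Int := (PySem.List.max? xs (fun x => x)).getD 0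
def pyMinA (xs : List Int) : Int := (PySem.List.min? xs (fun x => x)).getD 0

-- state: (all segments but the last, the last segment, prev_res)
def aStep (min_secondary_struct_len max_allowed_gap : Int)
    (st : List (List Int) × List Int × Option Int) (res : Int) :
    List (List Int) × List Int × Option Int :=
  match st with
  | (done, last, prev) =>
    match prev with
    | none => (done, last ++ [res], some res)
    | some p =>
      let allowed : PySem.Set Int :=
        PySem.Set.ofList ((p + 1) :: (PySem.List.pyRange 0 max_allowed_gap 1).map (fun i => p + 1 + i))
      if res ∉ allowed then
        if pyMaxA last - pyMinA last ≥ min_secondary_struct_len then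
          (done ++ [last], [] ++ [res], some res)
        else
          (done, [] ++ [res], some res)
      else (done, last ++ [res], some res)

def find_continuous_segments_longer_than (residues_subset : List Int) (min_secondary_struct_len : Int) (max_allowed_gap : Int) : List (List Int) :=
  let st := (PySem.List.sorted residues_subset (fun x => x) false).foldl
      (aStep min_secondary_struct_len max_allowed_gap) ([], [], none)
  if st.2.1.length = 0 ∨ pyMaxA st.2.1 - pyMinA st.2.1 < min_secondary_struct_len then st.1
  else st.1 ++ [st.2.1]

-- ===== PORT B =====
-- starts = [i for i in range(n) if i == 0 or not (s[i-1]+1 <= s[i] <= s[i-1]+step)]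
-- bounds = zip(starts, starts[1:] + [n]);  result = [s[b:e] for b,e in bounds if span ok]
def find_continuous_segments_longer_than_alt (residues_subset : List Int) (min_secondary_struct_len : Int) (max_allowed_gap : Int) : List (List Int) :=
  let s := PySem.List.sorted residues_subset (fun x => x) false
  let step := max 1 max_allowed_gap
  let n : Int := (s.length : Int)
  let starts := (PySem.List.pyRange 0 n 1).filter
    (fun i => i == 0 ||
      !(decide (PySem.List.pyGetD s (i - 1) 0 + 1 ≤ PySem.List.pyGetD s i 0 ∧
                PySem.List.pyGetD s i 0 ≤ PySem.List.pyGetD s (i - 1) 0 + step)))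
  let bounds := starts.zip (starts.drop 1 ++ [n])
  (bounds.filter (fun be =>
      decide (PySem.List.pyGetD s (be.2 - 1) 0 - PySem.List.pyGetD s be.1 0 ≥ min_secondary_struct_len))).map
    (fun be => PySem.List.slice s (some be.1) (some be.2))

-- ===== PRECONDITION & SPEC =====
def Spec_find_continuous_segments_longer_than (residues_subset : List Int) (min_secondary_struct_len : Int) (max_allowed_gap : Int) (out : List (List Int)) : Prop := out = find_continuous_segments_longer_than_alt residues_subset min_secondary_struct_len max_allowed_gap
instance (residues_subset : List Int) (min_secondary_struct_len : Int) (max_allowed_gap : Int) (out : List (List Int)) : Decidable (Spec_find_continuous_segments_longer_than residues_subset min_secondary_struct_len max_allowed_gap out) := by unfold Spec_find_continuous_segments_longer_than; infer_instance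

-- ===== CLAIM (what is proved, stated in full; the proofs are below) =====
def Claim_equal_find_continuous_segments_longer_than : Prop := ∀ (residues_subset : List Int) (min_secondary_struct_len : Int) (max_allowed_gap : Int), Dom_find_continuous_segments_longer_than residues_subset min_secondary_struct_len max_allowed_gap → Spec_find_continuous_segments_longer_than residues_subset min_secondary_struct_len max_allowed_gap (find_continuous_segments_longer_than residues_subset min_secondary_struct_len max_allowed_gap)

-- ===== LEMMAS AND PROOFS =====

-- ---- proof-side helpers: a fold-based grouping (bridging A's loop) and a recursive chunking ----

-- fold-based grouping; state: (finished raw runs, current run)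
def bStep (step : Int) (st : List (List Int) × List Int) (v : Int) : List (List Int) × List Int :=
  match st with
  | (segs, cur) =>
    if cur ≠ [] ∧ (PySem.List.pyGetD cur (-1) 0 + 1 ≤ v ∧ v ≤ PySem.List.pyGetD cur (-1) 0 + step) then
      (segs, cur ++ [v])
    else
      (if cur ≠ [] then segs ++ [cur] else segs, [v])

def bFinish (st : List (List Int) × List Int) : List (List Int) :=
  if st.2 ≠ [] then st.1 ++ [st.2] else st.1

-- recursive chunking: spanRun step p xs = (maximal run continuing p, rest)
def spanRun (step p : Int) : List Int → List Int × List Int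
  | [] => ([], [])
  | x :: xs =>
    if p + 1 ≤ x ∧ x ≤ p + step then
      (x :: (spanRun step x xs).1, (spanRun step x xs).2)
    else ([], x :: xs)

lemma spanRun_snd_length_le (step : Int) : ∀ (xs : List Int) (p : Int),
    (spanRun step p xs).2.length ≤ xs.length := by
  intro xs
  induction xs with
  | nil => intro p; simp [spanRun]
  | cons x xs ih =>
    intro p
    simp only [spanRun]
    split
    · exact le_trans (ih x) (Nat.le_succ _)
    · simp

def chunks (step : Int) : List Int → List (List Int)
  | [] => []
  | x :: xs => (x :: (spanRun step x xs).1) :: chunks step (spanRun step x xs).2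
termination_by s => s.length
decreasing_by
  simp only [List.length_cons]
  exact Nat.lt_succ_of_le (spanRun_snd_length_le _ xs x)

-- the break-index machinery B uses, as named proof-side functions
def startsOf (step : Int) (s : List Int) : List Int :=
  (PySem.List.pyRange 0 (s.length : Int) 1).filter
    (fun i => i == 0 ||
      !(decide (PySem.List.pyGetD s (i - 1) 0 + 1 ≤ PySem.List.pyGetD s i 0 ∧
                PySem.List.pyGetD s i 0 ≤ PySem.List.pyGetD s (i - 1) 0 + step)))

def boundsOf (step : Int) (s : List Int) : List (Int × Int) :=
  (startsOf step s).zip ((startsOf step s).drop 1 ++ [(s.length : Int)])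

-- ---- A-side lemmas (A's fold equals the filtered bStep fold) ----

lemma mem_allowed_iff (p gap res : Int) :
    (res ∈ PySem.Set.ofList ((p + 1) :: (PySem.List.pyRange 0 gap 1).map (fun i => p + 1 + i)))
    ↔ (p + 1 ≤ res ∧ res ≤ p + max 1 gap) := by
  simp only [PySem.Set.mem_ofList, List.mem_cons, List.mem_map, PySem.List.mem_pyRange_one]
  constructor
  · rintro (h | ⟨i, ⟨h0, h1⟩, rfl⟩) <;> omega
  · rintro ⟨h1, h2⟩
    rcases le_or_gt gap 1 with hg | hg
    · left; rw [max_eq_left hg] at h2; omega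
    · rw [max_eq_right (by omega)] at h2
      by_cases he : res = p + 1
      · left; omega
      · right; exact ⟨res - p - 1, ⟨by omega, by omega⟩, by ring⟩

lemma foldl_max_pairwise (c : Int) (cs : List Int) (h : List.Pairwise (· < ·) (c :: cs)) :
    cs.foldl max c = cs.getLastD c := by
  induction cs generalizing c with
  | nil => rfl
  | cons d ds ih =>
    rcases List.pairwise_cons.mp h with ⟨hc, hp⟩
    simp only [List.foldl_cons, List.getLastD_cons]
    rw [max_eq_right (hc d (by simp)).le, ih d hp]

lemma foldl_min_of_le (c : Int) (cs : List Int) (h : ∀ x ∈ cs, c ≤ x) :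
    cs.foldl min c = c := by
  induction cs with
  | nil => rfl
  | cons d ds ih =>
    simp only [List.foldl_cons]
    rw [min_eq_left (h d (by simp))]
    exact ih (fun x hx => h x (by simp [hx]))

lemma pyMaxA_pairwise (c : Int) (cs : List Int) (h : List.Pairwise (· < ·) (c :: cs)) :
    pyMaxA (c :: cs) = cs.getLastD c := by
  rw [pyMaxA, PySem.List.max?_id_cons, Option.getD_some, foldl_max_pairwise c cs h]

lemma pyMinA_pairwise (c : Int) (cs : List Int) (h : List.Pairwise (· < ·) (c :: cs)) :
    pyMinA (c :: cs) = c := by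
  rw [pyMinA, PySem.List.min?_id_cons, Option.getD_some, foldl_min_of_le]
  exact fun x hx => ((List.pairwise_cons.mp h).1 x hx).le

lemma le_getLastD_of_pairwise (c : Int) (cs : List Int) (h : List.Pairwise (· < ·) (c :: cs)) :
    ∀ a ∈ c :: cs, a ≤ cs.getLastD c := by
  induction cs generalizing c with
  | nil => intro a ha; simp at ha ⊢; omega
  | cons d ds ih =>
    rcases List.pairwise_cons.mp h with ⟨hc, hp⟩
    intro a ha
    rw [List.getLastD_cons]
    rcases List.mem_cons.mp ha with rfl | ha'
    · exact le_trans (hc d (by simp)).le (ih d hp d (by simp))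
    · exact ih d hp a ha'

lemma pairwise_append_singleton (c v : Int) (cs : List Int)
    (h : List.Pairwise (· < ·) (c :: cs)) (hv : cs.getLastD c < v) :
    List.Pairwise (· < ·) ((c :: cs) ++ [v]) := by
  rw [List.pairwise_append]
  refine ⟨h, List.pairwise_singleton _ _, ?_⟩
  intro a ha b hb
  rw [List.mem_singleton.mp hb]
  exact lt_of_le_of_lt (le_getLastD_of_pairwise c cs h a ha) hv

lemma pyGetD_last_cons (c : Int) (cs : List Int) :
    PySem.List.pyGetD (c :: cs) (-1) 0 = cs.getLastD c := by
  rw [PySem.List.pyGetD_neg_one (xs := c :: cs) (d := 0) (List.cons_ne_nil c cs)]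
  simp [List.getLast_eq_getLastD]

-- main loop correspondence: A's fold state (done, cur, some prev) with filtered done vs (raw segs, cur)
lemma loop_eq (m gap : Int) (rest : List Int) :
    ∀ (dA segsB : List (List Int)) (c : Int) (cs : List Int),
    List.Pairwise (· < ·) (c :: cs) →
    dA = segsB.filter (fun s => decide (PySem.List.pyGetD s (-1) 0 - PySem.List.pyGetD s 0 0 ≥ m)) →
    (let st := rest.foldl (aStep m gap) (dA, c :: cs, some (cs.getLastD c));
     if st.2.1.length = 0 ∨ pyMaxA st.2.1 - pyMinA st.2.1 < m then st.1 else st.1 ++ [st.2.1])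
    = (bFinish (rest.foldl (bStep (max 1 gap)) (segsB, c :: cs))).filter
         (fun s => decide (PySem.List.pyGetD s (-1) 0 - PySem.List.pyGetD s 0 0 ≥ m)) := by
  induction rest with
  | nil =>
    intro dA segsB c cs hchain hrel
    simp only [List.foldl_nil, bFinish]
    rw [pyMaxA_pairwise c cs hchain, pyMinA_pairwise c cs hchain]
    simp only [List.length_cons, Nat.succ_ne_zero, false_or,
      List.cons_ne_nil, ne_eq, not_false_eq_true, if_true, List.filter_append, hrel]
    by_cases hs : cs.getLastD c - c ≥ m
    · rw [if_neg (by omega)]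
      simp only [List.getLastD_eq_getLast?] at hs
      simp [pyGetD_last_cons, PySem.List.pyGetD_zero_cons,
        List.getLastD_eq_getLast?, hs]
    · rw [if_pos (by omega)]
      simp only [List.getLastD_eq_getLast?] at hs
      simp [pyGetD_last_cons, PySem.List.pyGetD_zero_cons,
        List.getLastD_eq_getLast?, hs]
  | cons r rest ih =>
    intro dA segsB c cs hchain hrel
    simp only [List.foldl_cons]
    by_cases hc : (cs.getLastD c) + 1 ≤ r ∧ r ≤ (cs.getLastD c) + max 1 gap
    · -- continue the run
      have hstepA : aStep m gap (dA, c :: cs, some (cs.getLastD c)) r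
          = (dA, (c :: cs) ++ [r], some r) := by
        simp only [aStep]
        rw [if_neg (by simp only [mem_allowed_iff]; tauto)]
      have hstepB : bStep (max 1 gap) (segsB, c :: cs) r = (segsB, (c :: cs) ++ [r]) := by
        simp only [bStep]
        rw [if_pos (by rw [pyGetD_last_cons]; exact ⟨List.cons_ne_nil c cs, hc⟩)]
      rw [hstepA, hstepB, List.cons_append]
      have hr : some r = some ((cs ++ [r]).getLastD c) := by simp
      rw [hr]
      exact ih dA segsB c (cs ++ [r])
        (by rw [← List.cons_append]; exact pairwise_append_singleton c r cs hchain (by omega)) hrel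
    · -- break the run
      have hstepA : aStep m gap (dA, c :: cs, some (cs.getLastD c)) r
          = ((if pyMaxA (c :: cs) - pyMinA (c :: cs) ≥ m then dA ++ [c :: cs] else dA),
             [r], some r) := by
        simp only [aStep]
        rw [if_pos (by simp only [mem_allowed_iff]; tauto)]
        split <;> rfl
      have hstepB : bStep (max 1 gap) (segsB, c :: cs) r
          = (segsB ++ [c :: cs], [r]) := by
        simp only [bStep]
        rw [if_neg (by rw [pyGetD_last_cons]; tauto)]
        simp
      rw [hstepA, hstepB]
      have hr : some r = some (([] : List Int).getLastD r) := rfl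
      rw [hr]
      refine ih _ _ r [] (List.pairwise_singleton _ _) ?_
      rw [pyMaxA_pairwise c cs hchain, pyMinA_pairwise c cs hchain, hrel,
        List.filter_append]
      by_cases hs : cs.getLastD c - c ≥ m
      · rw [if_pos hs]
        simp only [List.getLastD_eq_getLast?] at hs
        simp [pyGetD_last_cons, PySem.List.pyGetD_zero_cons,
          List.getLastD_eq_getLast?, hs]
      · rw [if_neg hs]
        simp only [List.getLastD_eq_getLast?] at hs
        simp [pyGetD_last_cons, PySem.List.pyGetD_zero_cons,
          List.getLastD_eq_getLast?, hs]

-- ---- fold grouping equals recursive chunking ----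

lemma fold_decomp (step : Int) : ∀ (xs : List Int) (segs : List (List Int)) (run : List Int) (p : Int),
    run ≠ [] → PySem.List.pyGetD run (-1) 0 = p →
    bFinish (xs.foldl (bStep step) (segs, run))
      = segs ++ (run ++ (spanRun step p xs).1) :: chunks step (spanRun step p xs).2 := by
  intro xs
  induction xs with
  | nil =>
    intro segs run p hne _
    simp [bFinish, spanRun, chunks, hne]
  | cons x xs ih =>
    intro segs run p hne hlast
    simp only [List.foldl_cons]
    by_cases hin : p + 1 ≤ x ∧ x ≤ p + step
    · have hstep : bStep step (segs, run) x = (segs, run ++ [x]) := by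
        simp only [bStep]
        rw [if_pos (by rw [hlast]; exact ⟨hne, hin⟩)]
      rw [hstep, ih segs (run ++ [x]) x (by simp) (by simp [PySem.List.pyGetD_neg_one_append_singleton])]
      simp [spanRun, hin]
    · have hstep : bStep step (segs, run) x = (segs ++ [run], [x]) := by
        simp only [bStep]
        rw [if_neg (by rw [hlast]; tauto)]
        simp [hne]
      rw [hstep, ih (segs ++ [run]) [x] x (by simp) (by rw [PySem.List.pyGetD_neg_one (xs := [x]) (d := 0) (List.cons_ne_nil x [])]; rfl)]
      simp only [spanRun, if_neg hin]
      rw [chunks]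
      simp

lemma foldFinish_eq_chunks (step : Int) (s : List Int) :
    bFinish (s.foldl (bStep step) ([], [])) = chunks step s := by
  cases s with
  | nil => simp [bFinish, chunks]
  | cons x xs =>
    simp only [List.foldl_cons]
    have hstep : bStep step (([], []) : List (List Int) × List Int) x = ([], [x]) := by
      simp [bStep]
    rw [hstep, fold_decomp step xs [] [x] x (by simp) (by rw [PySem.List.pyGetD_neg_one (xs := [x]) (d := 0) (List.cons_ne_nil x [])]; rfl),
      chunks]
    simp

-- ---- chunking equals slicing at break indices ----

lemma spanRun_append (step : Int) : ∀ (xs : List Int) (p : Int),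
    (spanRun step p xs).1 ++ (spanRun step p xs).2 = xs := by
  intro xs
  induction xs with
  | nil => intro p; simp [spanRun]
  | cons x xs ih =>
    intro p
    simp only [spanRun]
    split
    · simpa using ih x
    · simp

lemma spanRun_getD (step : Int) : ∀ (xs : List Int) (p : Int),
    ∀ i : Nat, i + 1 < (p :: (spanRun step p xs).1).length →
      (p :: (spanRun step p xs).1).getD i 0 + 1 ≤ (p :: (spanRun step p xs).1).getD (i + 1) 0 ∧
      (p :: (spanRun step p xs).1).getD (i + 1) 0 ≤ (p :: (spanRun step p xs).1).getD i 0 + step := by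
  intro xs
  induction xs with
  | nil => intro p i hi; simp [spanRun] at hi
  | cons x xs ih =>
    intro p i hi
    by_cases hin : p + 1 ≤ x ∧ x ≤ p + step
    · simp only [spanRun, if_pos hin] at hi ⊢
      cases i with
      | zero => simpa using hin
      | succ j =>
        have := ih x j (by simpa using hi)
        simpa using this
    · simp only [spanRun, if_neg hin] at hi
      simp at hi

lemma spanRun_break (step : Int) : ∀ (xs : List Int) (p y : Int) (t' : List Int),
    (spanRun step p xs).2 = y :: t' →
    ¬(((spanRun step p xs).1.getLastD p) + 1 ≤ y ∧ y ≤ ((spanRun step p xs).1.getLastD p) + step) := by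
  intro xs
  induction xs with
  | nil => intro p y t' h; simp [spanRun] at h
  | cons x xs ih =>
    intro p y t' h
    by_cases hin : p + 1 ≤ x ∧ x ≤ p + step
    · simp only [spanRun, if_pos hin] at h ⊢
      rw [List.getLastD_cons]
      exact ih x y t' h
    · simp only [spanRun, if_neg hin] at h ⊢
      obtain ⟨rfl, rfl⟩ : y = x ∧ t' = xs := by
        constructor <;> [exact (List.cons.injEq .. ▸ h).1.symm; exact (List.cons.injEq .. ▸ h).2.symm]
      simpa using hin

lemma getD_last_cons (x : Int) (r : List Int) :
    (x :: r).getD ((x :: r).length - 1) 0 = r.getLastD x := by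
  induction r generalizing x with
  | nil => simp
  | cons b r' ih =>
    simp only [List.length_cons, List.getLastD_cons]
    have h : r'.length + 1 + 1 - 1 = r'.length + 1 := by omega
    rw [h]
    simpa using ih b

lemma pyGetD_append_left (u t : List Int) (i : Int) (h0 : 0 ≤ i) (h1 : i < (u.length : Int)) (d : Int) :
    PySem.List.pyGetD (u ++ t) i d = u.getD i.toNat d := by
  rw [show i = ((i.toNat : Nat) : Int) by omega, PySem.List.pyGetD_natCast]
  have hlt : i.toNat < u.length := by omega
  simp [List.getD, List.getElem?_append_left hlt, max_eq_left h0]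

lemma pyGetD_append_right (u t : List Int) (i : Int) (h0 : (u.length : Int) ≤ i) (d : Int) :
    PySem.List.pyGetD (u ++ t) i d = PySem.List.pyGetD t (i - (u.length : Int)) d := by
  have h0' : (0 : Int) ≤ i := le_trans (by positivity) h0
  rw [show i = ((i.toNat : Nat) : Int) by omega, PySem.List.pyGetD_natCast,
    show ((i.toNat : Nat) : Int) - (u.length : Int) = ((i.toNat - u.length : Nat) : Int) by omega,
    PySem.List.pyGetD_natCast]
  have hle : u.length ≤ i.toNat := by omega
  simp [List.getD, List.getElem?_append_right hle]

lemma starts_decomp (step x : Int) (r t : List Int)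
    (hchain : ∀ i : Nat, i + 1 < (x :: r).length →
      (x :: r).getD i 0 + 1 ≤ (x :: r).getD (i + 1) 0 ∧
      (x :: r).getD (i + 1) 0 ≤ (x :: r).getD i 0 + step)
    (hbreak : ∀ y t'', t = y :: t'' →
      ¬(r.getLastD x + 1 ≤ y ∧ y ≤ r.getLastD x + step)) :
    startsOf step ((x :: r) ++ t)
      = 0 :: (startsOf step t).map (fun j => (((x :: r).length : Nat) : Int) + j) := by
  have hk : (0 : Int) < (((x :: r).length : Nat) : Int) := by
    exact_mod_cast List.length_pos_of_ne_nil (List.cons_ne_nil x r)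
  unfold startsOf
  have hlen : ((((x :: r) ++ t).length : Nat) : Int)
      = (((x :: r).length : Nat) : Int) + ((t.length : Nat) : Int) := by
    simp
    ring
  rw [hlen, PySem.List.pyRange_one_append 0 (((x :: r).length : Nat) : Int) _ hk.le (by omega),
    List.filter_append]
  have h1 : (PySem.List.pyRange 0 (((x :: r).length : Nat) : Int) 1).filter
      (fun i => i == 0 ||
        !(decide (PySem.List.pyGetD ((x :: r) ++ t) (i - 1) 0 + 1 ≤ PySem.List.pyGetD ((x :: r) ++ t) i 0 ∧
          PySem.List.pyGetD ((x :: r) ++ t) i 0 ≤ PySem.List.pyGetD ((x :: r) ++ t) (i - 1) 0 + step))) = [0] := by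
    rw [PySem.List.pyRange_one_cons hk, List.filter_cons_of_pos (by simp)]
    have hnil : (PySem.List.pyRange (0 + 1) (((x :: r).length : Nat) : Int) 1).filter
        (fun i => i == 0 ||
          !(decide (PySem.List.pyGetD ((x :: r) ++ t) (i - 1) 0 + 1 ≤ PySem.List.pyGetD ((x :: r) ++ t) i 0 ∧
            PySem.List.pyGetD ((x :: r) ++ t) i 0 ≤ PySem.List.pyGetD ((x :: r) ++ t) (i - 1) 0 + step))) = [] := by
      rw [List.filter_eq_nil_iff]
      intro i hi
      obtain ⟨hi1, hi2⟩ := PySem.List.mem_pyRange_one.mp hi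
      have hgi : PySem.List.pyGetD ((x :: r) ++ t) i 0 = (x :: r).getD i.toNat 0 :=
        pyGetD_append_left _ _ _ (by omega) (by omega) _
      have hgi1 : PySem.List.pyGetD ((x :: r) ++ t) (i - 1) 0 = (x :: r).getD (i - 1).toNat 0 :=
        pyGetD_append_left _ _ _ (by omega) (by omega) _
      have hch := hchain (i - 1).toNat (by omega)
      have hstep : (i - 1).toNat + 1 = i.toNat := by omega
      rw [hstep] at hch
      simp only [hgi, hgi1, Bool.or_eq_true, beq_iff_eq, Bool.not_eq_true', not_or,
        Bool.not_eq_false, decide_eq_true_eq]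
      exact ⟨by omega, hch⟩
    rw [hnil]
  rw [h1]
  have h2 : (PySem.List.pyRange (((x :: r).length : Nat) : Int)
        ((((x :: r).length : Nat) : Int) + ((t.length : Nat) : Int)) 1).filter
      (fun i => i == 0 ||
        !(decide (PySem.List.pyGetD ((x :: r) ++ t) (i - 1) 0 + 1 ≤ PySem.List.pyGetD ((x :: r) ++ t) i 0 ∧
          PySem.List.pyGetD ((x :: r) ++ t) i 0 ≤ PySem.List.pyGetD ((x :: r) ++ t) (i - 1) 0 + step)))
      = ((PySem.List.pyRange 0 ((t.length : Nat) : Int) 1).filter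
          (fun i => i == 0 ||
            !(decide (PySem.List.pyGetD t (i - 1) 0 + 1 ≤ PySem.List.pyGetD t i 0 ∧
              PySem.List.pyGetD t i 0 ≤ PySem.List.pyGetD t (i - 1) 0 + step)))).map
          (fun j => (((x :: r).length : Nat) : Int) + j) := by
    rw [PySem.List.pyRange_one (((x :: r).length : Nat) : Int) _,
      show (((((x :: r).length : Nat) : Int) + ((t.length : Nat) : Int)) - (((x :: r).length : Nat) : Int)).toNat
        = t.length by omega,
      PySem.List.pyRange_zero_natCast t.length,
      List.filter_map, List.filter_map, List.map_map]
    have hpred : ∀ j ∈ List.range t.length,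
        ((fun i => i == 0 ||
          !(decide (PySem.List.pyGetD ((x :: r) ++ t) (i - 1) 0 + 1 ≤ PySem.List.pyGetD ((x :: r) ++ t) i 0 ∧
            PySem.List.pyGetD ((x :: r) ++ t) i 0 ≤ PySem.List.pyGetD ((x :: r) ++ t) (i - 1) 0 + step))) ∘
          (fun j : Nat => (((x :: r).length : Nat) : Int) + (j : Int))) j
        = ((fun i => i == 0 ||
          !(decide (PySem.List.pyGetD t (i - 1) 0 + 1 ≤ PySem.List.pyGetD t i 0 ∧
            PySem.List.pyGetD t i 0 ≤ PySem.List.pyGetD t (i - 1) 0 + step))) ∘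
          (fun j : Nat => (j : Int))) j := by
      intro j hj
      have hjt : j < t.length := List.mem_range.mp hj
      simp only [Function.comp_apply]
      by_cases hj0 : j = 0
      · subst hj0
        obtain ⟨y, t'', rfl⟩ : ∃ y t'', t = y :: t'' := by
          cases t with
          | nil => simp at hjt
          | cons y t'' => exact ⟨y, t'', rfl⟩
        have hg0 : PySem.List.pyGetD ((x :: r) ++ y :: t'') ((((x :: r).length : Nat) : Int) + (0:Nat) - 1) 0
            = r.getLastD x := by
          rw [show ((((x :: r).length : Nat) : Int) + ((0:Nat):Int) - 1) = (((x :: r).length : Nat) : Int) - 1 by push_cast; ring]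
          rw [pyGetD_append_left _ _ _ (by omega) (by omega) _,
            show ((((x :: r).length : Nat) : Int) - 1).toNat = (x :: r).length - 1 by omega,
            getD_last_cons]
        have hg1 : PySem.List.pyGetD ((x :: r) ++ y :: t'') ((((x :: r).length : Nat) : Int) + (0:Nat)) 0 = y := by
          rw [pyGetD_append_right _ _ _ (by omega) _]
          rw [show ((((x :: r).length : Nat) : Int) + ((0:Nat):Int) - (((x :: r).length : Nat) : Int)) = 0 by push_cast; ring]
          rw [PySem.List.pyGetD_zero_cons]
        have hbrk := hbreak y t'' rfl
        simp only [hg0, hg1]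
        rw [List.getLastD_eq_getLast?] at hbrk
        simp
        by_cases hy : y ≤ r.getLast?.getD x
        · exact Or.inr (Or.inl hy)
        · refine Or.inr (Or.inr ?_)
          by_contra hys
          exact hbrk ⟨Int.add_one_le_iff.mpr (not_le.mp hy), not_lt.mp hys⟩
      · have hg0 : PySem.List.pyGetD ((x :: r) ++ t) ((((x :: r).length : Nat) : Int) + (j:Int) - 1) 0
            = PySem.List.pyGetD t ((j : Int) - 1) 0 := by
          rw [pyGetD_append_right _ _ _ (by omega) _,
            show ((((x :: r).length : Nat) : Int) + (j:Int) - 1 - (((x :: r).length : Nat) : Int)) = (j:Int) - 1 by ring]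
        have hg1 : PySem.List.pyGetD ((x :: r) ++ t) ((((x :: r).length : Nat) : Int) + (j:Int)) 0
            = PySem.List.pyGetD t (j : Int) 0 := by
          rw [pyGetD_append_right _ _ _ (by omega) _,
            show ((((x :: r).length : Nat) : Int) + (j:Int) - (((x :: r).length : Nat) : Int)) = (j:Int) by ring]
        simp only [hg0, hg1]
        have e1 : ((((x :: r).length : Nat) : Int) + (j:Int) == 0) = false := by
          simp; omega
        have e2 : ((j : Int) == 0) = false := by
          simp; omega
        rw [e1, e2]
    rw [List.filter_congr hpred]
    rfl
  rw [h2]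
  rfl

lemma startsOf_cons_zero (step : Int) (t : List Int) (ht : t ≠ []) :
    ∃ st', startsOf step t = 0 :: st' := by
  have hl : (0 : Int) < (t.length : Int) := by
    have := List.length_pos_of_ne_nil ht; exact_mod_cast this
  unfold startsOf
  rw [PySem.List.pyRange_one_cons hl, List.filter_cons_of_pos (by simp)]
  exact ⟨_, rfl⟩

lemma bounds_decomp (step : Int) (u t : List Int)
    (h : startsOf step (u ++ t) = 0 :: (startsOf step t).map (fun j => (u.length : Int) + j)) :
    boundsOf step (u ++ t)
      = (0, (u.length : Int)) :: (boundsOf step t).map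
          (fun be => ((u.length : Int) + be.1, (u.length : Int) + be.2)) := by
  unfold boundsOf
  rw [h]
  by_cases ht : t = []
  · subst ht
    have hs0 : startsOf step ([] : List Int) = [] := by
      unfold startsOf
      rw [PySem.List.pyRange_one_eq_nil (by norm_num)]
      rfl
    rw [hs0]
    simp
  · obtain ⟨st', hst⟩ := startsOf_cons_zero step t ht
    rw [hst]
    have hmap : ∀ (l1 l2 : List Int),
        (l1.zip l2).map (fun be : Int × Int => ((u.length : Int) + be.1, (u.length : Int) + be.2))
          = (l1.map (fun j => (u.length : Int) + j)).zip (l2.map (fun j => (u.length : Int) + j)) := by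
      intro l1 l2
      rw [List.zip_map]
      apply List.map_congr_left
      intro a _
      rfl
    rw [hmap]
    simp only [List.map_cons, List.drop_succ_cons, List.drop_zero, List.cons_append,
      List.zip_cons_cons, List.map_append, List.map_cons, List.map_nil]
    have h1 : ((u ++ t).length : Int) = (u.length : Int) + (t.length : Int) := by
      simp
    rw [h1]
    simp

lemma startsOf_mem (step : Int) (s : List Int) :
    ∀ i ∈ startsOf step s, 0 ≤ i ∧ i < (s.length : Int) := by
  intro i hi
  have := List.mem_of_mem_filter hi
  exact (PySem.List.mem_pyRange_one).mp this

lemma startsOf_pairwise (step : Int) (s : List Int) :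
    (startsOf step s).Pairwise (· < ·) := by
  exact List.Pairwise.filter _ (PySem.List.pairwise_lt_pyRange_one _ _)

lemma zip_succ_wf : ∀ (l : List Int) (n : Int), l.Pairwise (· < ·) →
    (∀ x ∈ l, 0 ≤ x ∧ x < n) →
    ∀ be ∈ l.zip (l.drop 1 ++ [n]), 0 ≤ be.1 ∧ be.1 < be.2 ∧ be.2 ≤ n := by
  intro l
  induction l with
  | nil => intro n _ _ be hbe; simp at hbe
  | cons a l ih =>
    intro n hpw hbd be hbe
    cases l with
    | nil =>
      simp only [List.drop_succ_cons, List.drop_zero, List.nil_append, List.zip_cons_cons,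
        List.zip_nil_right, List.mem_singleton] at hbe
      subst hbe
      have := hbd a (by simp)
      exact ⟨this.1, this.2, le_refl n⟩
    | cons b l' =>
      simp only [List.drop_succ_cons, List.drop_zero, List.cons_append, List.zip_cons_cons,
        List.mem_cons] at hbe
      rcases hbe with rfl | hbe
      · have ha := hbd a (by simp)
        have hb := hbd b (by simp)
        have hab : a < b := (List.pairwise_cons.mp hpw).1 b (by simp)
        exact ⟨ha.1, hab, hb.2.le⟩
      · have : be ∈ (b :: l').zip ((b :: l').drop 1 ++ [n]) := by simpa using hbe
        exact ih n (List.Pairwise.of_cons hpw) (fun x hx => hbd x (by simp [hx])) be this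

-- bounds pairs are well-formed
lemma boundsOf_wf (step : Int) (s : List Int) :
    ∀ be ∈ boundsOf step s, 0 ≤ be.1 ∧ be.1 < be.2 ∧ be.2 ≤ (s.length : Int) := by
  intro be hbe
  exact zip_succ_wf (startsOf step s) (s.length : Int) (startsOf_pairwise step s)
    (startsOf_mem step s) be hbe

lemma slice_append_shift (u t : List Int) (b e : Int) (hb : 0 ≤ b) (he : 0 ≤ e) :
    PySem.List.slice (u ++ t) (some ((u.length : Int) + b)) (some ((u.length : Int) + e))
      = PySem.List.slice t (some b) (some e) := by
  rw [PySem.List.slice_toNat _ (by positivity) (by positivity),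
    PySem.List.slice_toNat _ hb he]
  rw [show ((u.length : Int) + b).toNat = u.length + b.toNat by omega,
    show ((u.length : Int) + e).toNat = u.length + e.toNat by omega,
    List.drop_length_add_append,
    show u.length + e.toNat - (u.length + b.toNat) = e.toNat - b.toNat by omega]

lemma slices_eq_chunks (step : Int) : ∀ (s : List Int),
    (boundsOf step s).map (fun be => PySem.List.slice s (some be.1) (some be.2)) = chunks step s := by
  intro s
  induction s using chunks.induct (step := step) with
  | case1 =>
    have hb : boundsOf step ([] : List Int) = [] := by
      unfold boundsOf startsOf
      rw [PySem.List.pyRange_one_eq_nil (by norm_num)]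
      rfl
    rw [hb, chunks]
    rfl
  | case2 x xs ih =>
    have hsp := spanRun_append step xs x
    have hsplit : x :: xs = (x :: (spanRun step x xs).1) ++ (spanRun step x xs).2 := by
      rw [List.cons_append, hsp]
    have hst := starts_decomp step x (spanRun step x xs).1 (spanRun step x xs).2
      (fun i hi => spanRun_getD step xs x i hi)
      (fun y t'' hyt => spanRun_break step xs x y t'' hyt)
    have hbd := bounds_decomp step (x :: (spanRun step x xs).1) (spanRun step x xs).2 hst
    rw [chunks, hsplit, hbd]
    simp only [List.map_cons, List.map_map]
    congr 1
    · rw [PySem.List.slice_zero_start, PySem.List.slice_to _ (by positivity)]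
      rw [show (((x :: (spanRun step x xs).1).length : Int)).toNat = (x :: (spanRun step x xs).1).length by omega]
      exact List.take_left
    · rw [← ih]
      apply List.map_congr_left
      intro be hbe
      have hwf := boundsOf_wf step (spanRun step x xs).2 be hbe
      exact slice_append_shift _ _ be.1 be.2 hwf.1 (by omega)

lemma slice_head_last (s : List Int) (b e : Int) (hb : 0 ≤ b) (hbe : b < e) (he : e ≤ (s.length : Int)) :
    PySem.List.pyGetD (PySem.List.slice s (some b) (some e)) 0 0 = PySem.List.pyGetD s b 0 ∧
    PySem.List.pyGetD (PySem.List.slice s (some b) (some e)) (-1) 0 = PySem.List.pyGetD s (e - 1) 0 := by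
  rw [PySem.List.slice_toNat _ hb (by omega)]
  have hlen : ((s.drop b.toNat).take (e.toNat - b.toNat)).length = e.toNat - b.toNat := by
    simp
    omega
  have hne : (s.drop b.toNat).take (e.toNat - b.toNat) ≠ [] := by
    intro hc
    rw [hc] at hlen
    simp at hlen
    omega
  constructor
  · rw [PySem.List.pyGetD_zero, List.getD_eq_getElem _ _ (by rw [hlen]; omega),
      List.getElem_take, List.getElem_drop,
      PySem.List.pyGetD_eq_getElem (xs := s) (i := b) (d := 0) hb (by omega)]
    simp
  · rw [PySem.List.pyGetD_neg_one (xs := List.take (e.toNat - b.toNat) (List.drop b.toNat s)) (d := 0) hne, List.getLast_eq_getElem hne]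
    rw [PySem.List.pyGetD_eq_getElem (xs := s) (i := e - 1) (d := 0) (by omega) (by omega)]
    have : ((s.drop b.toNat).take (e.toNat - b.toNat))[((s.drop b.toNat).take (e.toNat - b.toNat)).length - 1]'(by rw [hlen]; omega) = s[b.toNat + (e.toNat - b.toNat - 1)]'(by omega) := by
      rw [List.getElem_take, List.getElem_drop]
      congr 1
      rw [hlen]
    rw [this]
    congr 1
    omega

-- ---- assembly ----

lemma A_eq_chunks (m gap : Int) (s : List Int) :
    (let st := s.foldl (aStep m gap) ([], [], none);
     if st.2.1.length = 0 ∨ pyMaxA st.2.1 - pyMinA st.2.1 < m then st.1 else st.1 ++ [st.2.1])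
    = (chunks (max 1 gap) s).filter
        (fun seg => decide (PySem.List.pyGetD seg (-1) 0 - PySem.List.pyGetD seg 0 0 ≥ m)) := by
  cases s with
  | nil => simp [chunks]
  | cons v vs =>
    rw [← foldFinish_eq_chunks]
    simp only [List.foldl_cons]
    have hA : aStep m gap ([], [], none) v = ([], [v], some v) := rfl
    have hB : bStep (max 1 gap) (([], []) : List (List Int) × List Int) v = ([], [v]) := by
      simp [bStep]
    rw [hA, hB, show some v = some (([] : List Int).getLastD v) from rfl]
    exact loop_eq m gap vs [] [] v [] (List.pairwise_singleton _ _) rfl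

lemma B_eq_chunks (m gap : Int) (s : List Int) :
    ((boundsOf (max 1 gap) s).filter
        (fun be => decide (PySem.List.pyGetD s (be.2 - 1) 0 - PySem.List.pyGetD s be.1 0 ≥ m))).map
      (fun be => PySem.List.slice s (some be.1) (some be.2))
    = (chunks (max 1 gap) s).filter
        (fun seg => decide (PySem.List.pyGetD seg (-1) 0 - PySem.List.pyGetD seg 0 0 ≥ m)) := by
  rw [← slices_eq_chunks (max 1 gap) s, List.filter_map]
  congr 1
  apply List.filter_congr
  intro be hbe
  have h := boundsOf_wf _ s be hbe
  obtain ⟨hl, hr⟩ := slice_head_last s be.1 be.2 h.1 h.2.1 h.2.2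
  simp only [Function.comp_apply, hl, hr]

-- ===== VERDICT (by name: the statement is the Claim_ definition above) =====
theorem find_continuous_segments_longer_than_spec : Claim_equal_find_continuous_segments_longer_than := by
  unfold Claim_equal_find_continuous_segments_longer_than
  intro rs m gap _
  unfold Spec_find_continuous_segments_longer_than
  unfold find_continuous_segments_longer_than find_continuous_segments_longer_than_alt
  exact (A_eq_chunks m gap (PySem.List.sorted rs (fun x => x) false)).trans
    (B_eq_chunks m gap (PySem.List.sorted rs (fun x => x) false)).symm
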